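-- pv_equiv track=rewrite | github.com/emnzn/ViT-Based-WSI-Classification | training/src/utils/preprocess.py | adjust_coords
-- ===== SOURCE A (Python) =====
-- from typing import Tuple, List
--
-- def get_checkpoint(coords: List[Tuple[int]]) -> int:
--
--     """
--     Given a list of coordinates, gets the checkpoint.
--
--     The coordinates are in the form (y1, y2, x1, x2),
--     and must be sorted from left to right, then top to bottom.
--
--     The checkpoint is the index of the first coordinate where the x1 value
--     changes from 0 to another value, indicating a shift to the next column.
--     Suppose given a (448, 448) image wherein (224, 224) patches have been created:
--
--     Example:
--     [
--         (0, 224, 0, 224),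
--         (224, 448, 0, 224),
--         (0, 224, 224, 448),  -> this is the checkpoint (index 2)
--         (224, 448, 224, 448)
--     ]
--
--     Returns
--     -------
--     checkpoint: int
--         The index of the first coordinate where x1 changes.
--     """
--
--     for i, index in enumerate(coords):
--         if index[2] != 0:
--             checkpoint = i
--
--             return checkpoint
--
-- def adjust_coords(
--     coords: List[Tuple[int, int, int, int]],
--     new_size: int
--     ) -> List[Tuple[int, int, int, int]]:
--
--     """
--     To stitch embeddings back to the original shape, coordinates need to be adjusted according to the new dimensions.
--
--     Given a set of coordinates (sorted according to x1, x2, y1, y2), this scripts makes that adjustment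
--
--     Parameters
--     ----------
--     coords: List[Tuple[int]]
--         A list of coordinates sorted accoring to (x1, x2, y1, y2)
--
--     new_size: int
--         The new dimensions of each patch.
--         This can only cater to dimensions where height and width are equal.
--
--     Returns
--     -------
--     adjusted_coords: List[Tuple[int]]
--         The new coordinates of each patch adjusted acording to its new dimensions.
--     """
--
--     checkpoint = get_checkpoint(coords)
--     placeholder = [0, new_size, 0, new_size]
--     adjusted_coords = []
--
--     for i in range(len(coords)):
--         if i % checkpoint == 0 and i > 0:
--             placeholder[0] = 0
--             placeholder[1] = new_size
--
--             placeholder[2] += new_size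
--             placeholder[3] += new_size
--
--         y1, y2, = placeholder[0], placeholder[1]
--         x1, x2 = placeholder[2], placeholder[3]
--         adjusted_coords.append((y1, y2, x1, x2))
--
--         placeholder[0] += new_size
--         placeholder[1] += new_size
--
--     return adjusted_coords
-- ===== SOURCE B (Python) =====
-- from typing import Tuple, List
--
-- def get_checkpoint(coords: List[Tuple[int]]) -> int:
--     for i, index in enumerate(coords):
--         if index[2] != 0:
--             return i
--
-- def adjust_coords(coords, new_size):
--     # Closed-form per index: row/column come straight from divmod(i, checkpoint),
--     # no mutable placeholder threaded through the loop.
--     checkpoint = get_checkpoint(coords)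
--     adjusted_coords = []
--     for i in range(len(coords)):
--         col, row = divmod(i, checkpoint)
--         adjusted_coords.append((row * new_size, row * new_size + new_size,
--                                 col * new_size, col * new_size + new_size))
--     return adjusted_coords
-- ===== Notes on version B (the rewrite author's own statement) =====
-- stated objective: simpler
-- what changed: Replaces A's mutable 4-slot placeholder threaded through the loop (reset on column change, incremented each step) with a direct closed form per index: col, row = divmod(i, checkpoint) gives each adjusted tuple independently.
import Mathlib
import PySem

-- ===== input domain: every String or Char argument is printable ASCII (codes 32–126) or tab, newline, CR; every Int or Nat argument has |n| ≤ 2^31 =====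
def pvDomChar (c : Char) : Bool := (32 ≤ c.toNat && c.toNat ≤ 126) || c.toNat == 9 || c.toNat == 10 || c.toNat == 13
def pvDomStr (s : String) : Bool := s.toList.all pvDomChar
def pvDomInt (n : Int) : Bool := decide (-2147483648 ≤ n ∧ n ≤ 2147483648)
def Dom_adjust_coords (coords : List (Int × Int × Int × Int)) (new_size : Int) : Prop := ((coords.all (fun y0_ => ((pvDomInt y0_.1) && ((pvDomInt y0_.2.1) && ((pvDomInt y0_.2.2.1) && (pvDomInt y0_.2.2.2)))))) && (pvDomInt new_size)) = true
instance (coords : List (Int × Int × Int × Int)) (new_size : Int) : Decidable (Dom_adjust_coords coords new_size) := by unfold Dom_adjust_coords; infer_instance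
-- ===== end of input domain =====

-- B replaces A's mutable placeholder state with a closed-form divmod per index (objective: simpler).

-- ===== PORT A =====
-- shared module helper get_checkpoint: first index i with coords[i][2] != 0, None if absent
def gcAux : List (Int × Int × Int × Int) → Nat → Option Nat
  | [], _ => none
  | c :: rest, i => if c.2.2.1 ≠ 0 then some i else gcAux rest (i + 1)

def get_checkpoint (coords : List (Int × Int × Int × Int)) : Option Nat :=
  gcAux coords 0

-- A's loop: state = (placeholder, adjusted_coords accumulator)
def adjAStep (ck : Nat) (new_size : Int)
    (st : (Int × Int × Int × Int) × List (Int × Int × Int × Int)) (i : Nat) :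
    (Int × Int × Int × Int) × List (Int × Int × Int × Int) :=
  let p := st.1
  let p := if i % ck = 0 ∧ 0 < i then
             (0, new_size, p.2.2.1 + new_size, p.2.2.2 + new_size)
           else p
  ((p.1 + new_size, p.2.1 + new_size, p.2.2.1, p.2.2.2), st.2 ++ [(p.1, p.2.1, p.2.2.1, p.2.2.2)])

def adjust_coords (coords : List (Int × Int × Int × Int)) (new_size : Int) : List (Int × Int × Int × Int) :=
  match get_checkpoint coords with
  | some ck =>
      ((List.range coords.length).foldl (adjAStep ck new_size) ((0, new_size, 0, new_size), [])).2
  | none => []  -- Python raises TypeError here unless coords = [] (then the loop is empty and [] is returned); nonempty case excluded by Pre_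

-- ===== PORT B =====
def adjust_coords_alt (coords : List (Int × Int × Int × Int)) (new_size : Int) : List (Int × Int × Int × Int) :=
  match get_checkpoint coords with
  | some ck =>
      (List.range coords.length).map (fun i =>
        ((↑(i % ck) : Int) * new_size, (↑(i % ck) : Int) * new_size + new_size,
         (↑(i / ck) : Int) * new_size, (↑(i / ck) : Int) * new_size + new_size))
  | none => []  -- Python raises TypeError here unless coords = []; nonempty case excluded by Pre_

-- ===== PRECONDITION & SPEC =====
-- Pre_ excludes exactly the inputs where A raises: a nonempty coords whose first x1 is
-- nonzero (checkpoint = 0, ZeroDivisionError) or with no nonzero x1 at all (checkpoint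
-- = None, TypeError).  On everything A returns on, Pre_ holds.
def Pre_adjust_coords (coords : List (Int × Int × Int × Int)) (new_size : Int) : Prop :=
  coords ≠ [] → ((coords.headD (0, 0, 0, 0)).2.2.1 = 0 ∧ ∃ c ∈ coords, c.2.2.1 ≠ 0)

instance (coords : List (Int × Int × Int × Int)) (new_size : Int) : Decidable (Pre_adjust_coords coords new_size) := by
  unfold Pre_adjust_coords; infer_instance

def pvWitness_adjust_coords : (List (Int × Int × Int × Int)) × Int :=
  ([(0, 224, 0, 224), (224, 448, 0, 224), (0, 224, 224, 448), (224, 448, 224, 448)], 16)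

def Spec_adjust_coords (coords : List (Int × Int × Int × Int)) (new_size : Int) (out : List (Int × Int × Int × Int)) : Prop := out = adjust_coords_alt coords new_size
instance (coords : List (Int × Int × Int × Int)) (new_size : Int) (out : List (Int × Int × Int × Int)) : Decidable (Spec_adjust_coords coords new_size out) := by unfold Spec_adjust_coords; infer_instance

-- ===== CLAIM (what is proved, stated in full; the proofs are below) =====
def Claim_equal_adjust_coords : Prop := ∀ (coords : List (Int × Int × Int × Int)) (new_size : Int), Dom_adjust_coords coords new_size → Pre_adjust_coords coords new_size → Spec_adjust_coords coords new_size (adjust_coords coords new_size)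

-- ===== LEMMAS AND PROOFS =====

-- gcAux only returns indices ≥ its counter
lemma gcAux_ge (l : List (Int × Int × Int × Int)) (k m : Nat)
    (h : gcAux l k = some m) : k ≤ m := by
  induction l generalizing k with
  | nil => simp [gcAux] at h
  | cons c rest ih =>
    rw [gcAux] at h
    split at h
    · injection h with h; omega
    · have := ih (k + 1) h; omega

lemma gcAux_some (l : List (Int × Int × Int × Int)) (k : Nat)
    (h : ∃ c ∈ l, c.2.2.1 ≠ 0) : ∃ m, gcAux l k = some m := by
  induction l generalizing k with
  | nil => simp at h
  | cons c rest ih =>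
    by_cases hc : c.2.2.1 ≠ 0
    · exact ⟨k, by simp [gcAux, hc]⟩
    · simp only [gcAux, hc, if_false]
      apply ih
      rcases h with ⟨d, hd, hne⟩
      rcases List.mem_cons.mp hd with rfl | h'
      · exact absurd hne hc
      · exact ⟨d, h', hne⟩

-- successor div/mod facts for a variable positive divisor
lemma succ_divmod (ck n : Nat) (h : 0 < ck) :
    ((n + 1) % ck = 0 → n % ck + 1 = ck ∧ (n + 1) / ck = n / ck + 1) ∧
    ((n + 1) % ck ≠ 0 → (n + 1) % ck = n % ck + 1 ∧ (n + 1) / ck = n / ck) := by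
  have hd : (n + 1) / ck = n / ck + if ck ∣ n + 1 then 1 else 0 := Nat.succ_div
  have h1 := Nat.mod_add_div n ck
  have h2 := Nat.mod_add_div (n + 1) ck
  have h3 := Nat.mod_lt n h
  by_cases hdvd : ck ∣ n + 1
  · have hm : (n + 1) % ck = 0 := Nat.mod_eq_zero_of_dvd hdvd
    have hdv : (n + 1) / ck = n / ck + 1 := by rw [hd]; simp [hdvd]
    rw [hdv] at h2
    have hmul : ck * (n / ck + 1) = ck * (n / ck) + ck := by ring
    rw [hmul] at h2
    refine ⟨fun _ => ⟨?_, hdv⟩, fun hc => absurd hm hc⟩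
    generalize hP : ck * (n / ck) = p at h1 h2
    omega
  · have hm : (n + 1) % ck ≠ 0 := fun hz => hdvd (Nat.dvd_of_mod_eq_zero hz)
    have hdv : (n + 1) / ck = n / ck := by rw [hd]; simp [hdvd]
    rw [hdv] at h2
    refine ⟨fun hc => absurd hc hm, fun _ => ⟨?_, hdv⟩⟩
    generalize hP : ck * (n / ck) = p at h1 h2
    omega

-- the closed-form element B produces at index i
def qElem (ck : Nat) (ns : Int) (i : Nat) : Int × Int × Int × Int :=
  ((↑(i % ck) : Int) * ns, (↑(i % ck) : Int) * ns + ns,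
   (↑(i / ck) : Int) * ns, (↑(i / ck) : Int) * ns + ns)

-- placeholder state A holds after n iterations
def stateA (ck : Nat) (ns : Int) : Nat → Int × Int × Int × Int
  | 0 => (0, ns, 0, ns)
  | n + 1 => ((qElem ck ns n).1 + ns, (qElem ck ns n).2.1 + ns,
              (qElem ck ns n).2.2.1, (qElem ck ns n).2.2.2)

lemma foldA_invariant (ck : Nat) (hck : 0 < ck) (ns : Int) (n : Nat) :
    (List.range n).foldl (adjAStep ck ns) ((0, ns, 0, ns), []) =
      (stateA ck ns n, (List.range n).map (qElem ck ns)) := by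
  induction n with
  | zero => simp [stateA]
  | succ n ih =>
    rw [List.range_succ, List.foldl_append, List.map_append, ih]
    simp only [List.foldl_cons, List.foldl_nil, List.map_cons, List.map_nil]
    have key : (if n % ck = 0 ∧ 0 < n then
        (0, ns, (stateA ck ns n).2.2.1 + ns, (stateA ck ns n).2.2.2 + ns)
      else stateA ck ns n) = qElem ck ns n := by
      cases n with
      | zero => simp [stateA, qElem, Nat.zero_mod, Nat.zero_div]
      | succ m =>
        have hs := succ_divmod ck m hck
        by_cases hz : (m + 1) % ck = 0
        · obtain ⟨hmod, hdiv⟩ := hs.1 hz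
          rw [if_pos ⟨hz, Nat.succ_pos m⟩]
          simp only [stateA, qElem, hz, hdiv, Prod.mk.injEq]
          push_cast
          and_intros <;> ring
        · obtain ⟨hmod, hdiv⟩ := hs.2 hz
          rw [if_neg (by simp [hz])]
          simp only [stateA, qElem, hmod, hdiv, Prod.mk.injEq]
          push_cast
          and_intros <;> (try trivial) <;> (try ring)
    unfold adjAStep
    simp only [key]
    cases n with
    | zero => simp [stateA, qElem]
    | succ m => simp [stateA, qElem]

theorem adjust_coords_eq (coords : List (Int × Int × Int × Int)) (new_size : Int)
    (hpre : Pre_adjust_coords coords new_size) :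
    adjust_coords coords new_size = adjust_coords_alt coords new_size := by
  unfold adjust_coords adjust_coords_alt
  cases hcoords : coords with
  | nil => simp [get_checkpoint, gcAux]
  | cons c rest =>
    have hp := hpre (by simp [hcoords])
    rw [hcoords] at hp
    obtain ⟨hhead, hex⟩ := hp
    simp only [List.headD] at hhead
    have hck : ∃ m, get_checkpoint (c :: rest) = some m := by
      unfold get_checkpoint
      simp only [gcAux, hhead, ne_eq, not_true_eq_false, if_false]
      apply gcAux_some
      rcases hex with ⟨d, hd, hne⟩
      rcases List.mem_cons.mp hd with rfl | h'
      · exact absurd hhead hne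
      · exact ⟨d, h', hne⟩
    obtain ⟨m, hm⟩ := hck
    have hm1 : 1 ≤ m := by
      unfold get_checkpoint at hm
      simp only [gcAux, hhead, ne_eq, not_true_eq_false, if_false] at hm
      exact gcAux_ge rest 1 m hm
    rw [hm]
    dsimp only
    rw [foldA_invariant m (by omega) new_size]
    rfl

-- ===== VERDICT (by name: the statement is the Claim_ definition above) =====
theorem adjust_coords_spec : Claim_equal_adjust_coords := by
  intro coords new_size _ hpre
  unfold Spec_adjust_coords
  exact adjust_coords_eq coords new_size hpre
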